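-- pv_equiv track=rewrite | github.com/thimakjunior/ATS | src/ats_simulator/core.py | _keyword_presence
-- ===== SOURCE A (Python) =====
-- from typing import Iterable
--
-- def _keyword_presence(keywords: Iterable[str], cv_text: str) -> tuple[list[str], list[str]]:
--     lower = cv_text.lower()
--     matched, missing = [], []
--     for kw in keywords:
--         if kw and kw.lower() in lower:
--             matched.append(kw)
--         else:
--             missing.append(kw)
--     return matched, missing
-- ===== SOURCE B (Python) =====
-- def _keyword_presence(keywords, cv_text):
--     lower = cv_text.lower()
--     cache = {}
--     tagged = []
--     for kw in keywords:
--         k = kw.lower()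
--         if k not in cache:
--             cache[k] = bool(k) and k in lower
--         tagged.append((kw, cache[k]))
--     matched = [kw for kw, ok in tagged if ok]
--     missing = [kw for kw, ok in tagged if not ok]
--     return matched, missing
-- ===== Notes on version B (the rewrite author's own statement) =====
-- stated objective: alternative
-- what changed: B runs the substring test once per distinct lowered keyword (memoized in a dict), tags each keyword with the cached flag, and partitions the tagged list with two comprehensions, instead of A's per-keyword rescan into dual accumulator lists.
import Mathlib
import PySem

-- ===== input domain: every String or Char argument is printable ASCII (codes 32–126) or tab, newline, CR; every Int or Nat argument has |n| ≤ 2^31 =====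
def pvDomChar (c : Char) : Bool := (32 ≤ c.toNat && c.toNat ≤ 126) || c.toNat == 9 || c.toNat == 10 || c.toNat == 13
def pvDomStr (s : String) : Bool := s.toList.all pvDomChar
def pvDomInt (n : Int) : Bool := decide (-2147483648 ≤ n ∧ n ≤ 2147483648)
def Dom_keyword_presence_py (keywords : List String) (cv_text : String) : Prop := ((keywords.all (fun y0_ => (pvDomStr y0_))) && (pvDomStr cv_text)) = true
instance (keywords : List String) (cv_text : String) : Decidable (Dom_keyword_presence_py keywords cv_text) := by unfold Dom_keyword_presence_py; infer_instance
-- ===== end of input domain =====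

-- B memoizes the substring test per distinct lowered keyword in a dict, tags each keyword with
-- the cached flag, and partitions the tagged list with two filters, instead of A's per-keyword
-- rescan into two accumulator lists (objective: alternative; same return value everywhere).

-- ===== PORT A =====
-- one iteration of A's loop: append kw to matched or to missing
def kpAStep (lower : String) (st : List String × List String) (kw : String) : List String × List String :=
  if kw != "" && PySem.Str.isIn (PySem.Str.lower kw) lower then (st.1 ++ [kw], st.2)
  else (st.1, st.2 ++ [kw])

def keyword_presence_py (keywords : List String) (cv_text : String) : List String × List String :=
  let lower := PySem.Str.lower cv_text
  let st := keywords.foldl (kpAStep lower) ([], [])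
  (st.1, st.2)

-- ===== PORT B =====
-- cache[k] = bool(k) and k in lower  (k is an already-lowered keyword)
def kpFlag (lower k : String) : Bool := (k != "") && PySem.Str.isIn k lower

-- one iteration of Source B's tagging loop: state = (cache dict, tagged list)
def kpTagStep (lower : String) (st : PySem.Dict String Bool × List (String × Bool)) (kw : String) :
    PySem.Dict String Bool × List (String × Bool) :=
  let k := PySem.Str.lower kw
  let cache := if st.1.contains k then st.1 else st.1.insert k (kpFlag lower k)
  (cache, st.2 ++ [(kw, cache.getD k false)])

def keyword_presence_py_alt (keywords : List String) (cv_text : String) : List String × List String :=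
  let lower := PySem.Str.lower cv_text
  let st := keywords.foldl (kpTagStep lower) (PySem.Dict.empty, [])
  ((st.2.filter (fun p => p.2)).map (fun p => p.1),
   (st.2.filter (fun p => !p.2)).map (fun p => p.1))

-- ===== PRECONDITION & SPEC =====
def Spec_keyword_presence_py (keywords : List String) (cv_text : String) (out : List String × List String) : Prop := out = keyword_presence_py_alt keywords cv_text
instance (keywords : List String) (cv_text : String) (out : List String × List String) : Decidable (Spec_keyword_presence_py keywords cv_text out) := by unfold Spec_keyword_presence_py; infer_instance

-- ===== CLAIM (what is proved, stated in full; the proofs are below) =====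
def Claim_equal_keyword_presence_py : Prop := ∀ (keywords : List String) (cv_text : String), Dom_keyword_presence_py keywords cv_text → Spec_keyword_presence_py keywords cv_text (keyword_presence_py keywords cv_text)

-- ===== LEMMAS AND PROOFS =====

-- the per-keyword predicate both programs decide
def kpPred (lower kw : String) : Bool := (kw != "") && PySem.Str.isIn (PySem.Str.lower kw) lower

theorem kp_lower_eq_empty_iff (s : String) : PySem.Str.lower s = "" ↔ s = "" := by
  constructor
  · intro h
    have := congrArg String.toList h
    simp [PySem.Str.toList_lower, PySem.Chars.lower] at this
    exact String.ext (by simp [this])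
  · intro h; subst h; rfl

theorem kpFlag_lower (lower kw : String) : kpFlag lower (PySem.Str.lower kw) = kpPred lower kw := by
  unfold kpFlag kpPred
  by_cases h : kw = ""
  · subst h; rfl
  · have h2 : PySem.Str.lower kw ≠ "" := fun hl => h ((kp_lower_eq_empty_iff kw).mp hl)
    have e1 : (PySem.Str.lower kw != "") = true := by simp [h2]
    have e2 : (kw != "") = true := by simp [h]
    rw [e1, e2]

-- A's loop computes the two filters
theorem kpA_foldl (lower : String) (ks : List String) (m ms : List String) :
    ks.foldl (kpAStep lower) (m, ms)
    = (m ++ ks.filter (kpPred lower), ms ++ ks.filter (fun kw => !kpPred lower kw)) := by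
  induction ks generalizing m ms with
  | nil => simp
  | cons kw ks ih =>
    rw [List.foldl_cons]
    by_cases h : kpPred lower kw = true
    · have hstep : kpAStep lower (m, ms) kw = (m ++ [kw], ms) := by
        unfold kpAStep; unfold kpPred at h; rw [if_pos h]
      rw [hstep, ih]
      simp [h]
    · have hf : kpPred lower kw = false := by simpa using h
      have hstep : kpAStep lower (m, ms) kw = (m, ms ++ [kw]) := by
        unfold kpAStep; unfold kpPred at hf; rw [if_neg (by simp only [hf]; decide)]
      rw [hstep, ih]
      simp [hf]

-- cache correctness invariant for B's loop
def kpGood (lower : String) (c : PySem.Dict String Bool) : Prop :=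
  ∀ k v, c.get? k = some v → v = kpFlag lower k

theorem kpB_foldl (lower : String) (ks : List String) (c : PySem.Dict String Bool)
    (t : List (String × Bool)) (hg : kpGood lower c) :
    (ks.foldl (kpTagStep lower) (c, t)).2 = t ++ ks.map (fun kw => (kw, kpPred lower kw)) := by
  induction ks generalizing c t with
  | nil => simp
  | cons kw ks ih =>
    rw [List.foldl_cons]
    by_cases hc : c.contains (PySem.Str.lower kw) = true
    · have hv : c.getD (PySem.Str.lower kw) false = kpPred lower kw := by
        rw [PySem.Dict.contains_eq_isSome_get?] at hc
        obtain ⟨v, hv⟩ := Option.isSome_iff_exists.mp hc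
        rw [PySem.Dict.getD_eq_get?_getD, hv, Option.getD_some, hg _ _ hv, kpFlag_lower]
      have hstep : kpTagStep lower (c, t) kw = (c, t ++ [(kw, kpPred lower kw)]) := by
        simp only [kpTagStep]
        rw [if_pos hc, hv]
      rw [hstep, ih c _ hg]
      simp
    · have hstep : kpTagStep lower (c, t) kw
          = (c.insert (PySem.Str.lower kw) (kpFlag lower (PySem.Str.lower kw)),
             t ++ [(kw, kpPred lower kw)]) := by
        simp only [kpTagStep]
        rw [if_neg hc, PySem.Dict.getD_insert, if_pos rfl, kpFlag_lower]
      have hg' : kpGood lower (c.insert (PySem.Str.lower kw) (kpFlag lower (PySem.Str.lower kw))) := by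
        intro k' v h'
        by_cases hk : k' = PySem.Str.lower kw
        · subst hk
          rw [PySem.Dict.get?_insert_self] at h'
          exact (Option.some_inj.mp h').symm
        · rw [PySem.Dict.get?_insert_of_ne _ _ hk] at h'
          exact hg _ _ h'
      rw [hstep, ih _ _ hg']
      simp

-- ===== VERDICT (by name: the statement is the Claim_ definition above) =====
theorem keyword_presence_py_spec : Claim_equal_keyword_presence_py := by
  intro keywords cv_text _
  show _ = _
  simp only [keyword_presence_py, keyword_presence_py_alt]
  rw [kpA_foldl (PySem.Str.lower cv_text) keywords [] []]
  rw [kpB_foldl (PySem.Str.lower cv_text) keywords PySem.Dict.empty []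
      (by intro k v h; simp [PySem.Dict.get?_empty] at h)]
  simp [List.filter_map, List.map_map, Function.comp_def]
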